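-- pv_equiv track=rewrite | github.com/j-Halloran/advent-2024 | day5.py | parse_rules_and_updates
-- ===== SOURCE A (Python) =====
-- def parse_rules_and_updates(lines):
--     # Separate rules from updates
--     rules = []
--     updates = []
--     reading_rules = True
--
--     for line in lines:
--         if '|' in line and reading_rules:
--             rules.append(line)
--         else:
--             reading_rules = False
--             updates.append(line)
--
--     return rules, updates
-- ===== SOURCE B (Python) =====
-- def parse_rules_and_updates(lines):
--     lines = list(lines)
--     i = next((j for j, line in enumerate(lines) if '|' not in line), len(lines))
--     return lines[:i], lines[i:]
-- ===== Notes on version B (the rewrite author's own statement) =====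
-- stated objective: simpler
-- what changed: B computes the split index (the first line without '|') once and returns the two slices, instead of accumulating line-by-line into two lists under a reading_rules flag.
import Mathlib
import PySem

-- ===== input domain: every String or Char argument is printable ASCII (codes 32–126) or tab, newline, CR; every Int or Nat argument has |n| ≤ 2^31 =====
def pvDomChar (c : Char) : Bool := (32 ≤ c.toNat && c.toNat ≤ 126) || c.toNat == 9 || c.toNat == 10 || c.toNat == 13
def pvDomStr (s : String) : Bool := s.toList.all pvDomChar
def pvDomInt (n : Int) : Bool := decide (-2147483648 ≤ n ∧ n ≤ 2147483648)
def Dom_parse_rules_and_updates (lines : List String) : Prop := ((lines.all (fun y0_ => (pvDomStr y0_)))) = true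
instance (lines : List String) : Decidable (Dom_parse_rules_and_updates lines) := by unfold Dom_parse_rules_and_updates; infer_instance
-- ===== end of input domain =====

-- B computes the split index (first line without '|') once and slices, instead of A's
-- flag-driven accumulation; same return value, same cost.

-- ===== PORT A =====
-- A: loop over lines with state (rules, updates, reading_rules)
def parse_rules_and_updates (lines : List String) : List String × List String :=
  let st := lines.foldl
    (fun (st : List String × List String × Bool) line =>
      if PySem.Str.isIn "|" line && st.2.2 then
        (st.1 ++ [line], st.2.1, st.2.2)
      else
        (st.1, st.2.1 ++ [line], false))
    ([], [], true)
  (st.1, st.2.1)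

-- ===== PORT B =====
-- B: i = index of first line without '|' (len(lines) if none), return the two slices
def parse_rules_and_updates_alt (lines : List String) : List String × List String :=
  let i := lines.findIdx (fun line => !(PySem.Str.isIn "|" line))
  (lines.take i, lines.drop i)

-- ===== PRECONDITION & SPEC =====
def Spec_parse_rules_and_updates (lines : List String) (out : List String × List String) : Prop := out = parse_rules_and_updates_alt lines
instance (lines : List String) (out : List String × List String) : Decidable (Spec_parse_rules_and_updates lines out) := by unfold Spec_parse_rules_and_updates; infer_instance

-- ===== CLAIM (what is proved, stated in full; the proofs are below) =====
def Claim_equal_parse_rules_and_updates : Prop := ∀ (lines : List String), Dom_parse_rules_and_updates lines → Spec_parse_rules_and_updates lines (parse_rules_and_updates lines)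

-- ===== LEMMAS AND PROOFS =====

-- once reading_rules is false, every line goes to updates
theorem pv_foldl_false (lines : List String) (r u : List String) :
    lines.foldl
      (fun (st : List String × List String × Bool) line =>
        if PySem.Str.isIn "|" line && st.2.2 then (st.1 ++ [line], st.2.1, st.2.2)
        else (st.1, st.2.1 ++ [line], false))
      (r, u, false) = (r, u ++ lines, false) := by
  induction lines generalizing u with
  | nil => simp
  | cons l ls ih =>
    simp only [List.foldl_cons, Bool.and_false, Bool.false_eq_true, if_false]
    rw [ih]; simp

-- with reading_rules still true, the fold splits at the first pipe-less line
theorem pv_foldl_true (lines : List String) (r u : List String) :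
    (lines.foldl
      (fun (st : List String × List String × Bool) line =>
        if PySem.Str.isIn "|" line && st.2.2 then (st.1 ++ [line], st.2.1, st.2.2)
        else (st.1, st.2.1 ++ [line], false))
      (r, u, true)) =
    (r ++ lines.take (lines.findIdx (fun line => !(PySem.Str.isIn "|" line))),
     u ++ lines.drop (lines.findIdx (fun line => !(PySem.Str.isIn "|" line))),
     lines.all (fun line => PySem.Str.isIn "|" line)) := by
  induction lines generalizing r u with
  | nil => simp
  | cons l ls ih =>
    have hbr : PySem.Str.isIn "|" l = PySem.Chars.isIn ['|'] l.toList := by simp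
    by_cases h : PySem.Chars.isIn ['|'] l.toList = true
    · simp only [List.foldl_cons, hbr, h, Bool.true_and, if_true]
      rw [ih]
      simp [List.findIdx_cons, h]
    · simp only [Bool.not_eq_true] at h
      simp only [List.foldl_cons, hbr, h, Bool.false_and, Bool.false_eq_true, if_false]
      rw [pv_foldl_false]
      simp [List.findIdx_cons, h]

-- ===== VERDICT (by name: the statement is the Claim_ definition above) =====
theorem parse_rules_and_updates_spec : Claim_equal_parse_rules_and_updates := by
  intro lines _
  unfold Spec_parse_rules_and_updates parse_rules_and_updates parse_rules_and_updates_alt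
  rw [pv_foldl_true]
  simp
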